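-- pv_equiv track=rewrite | github.com/enismaxim1/2048-AI | game2048.py | collapse_row
-- ===== SOURCE A (Python) =====
-- def collapse_row(row):
--     score = 0
--     left_index = 0
--     right_index = 1
--     while right_index < len(row):
--         left_val = row[left_index]
--         right_val = row[right_index]
--         if right_val == 0:
--             right_index += 1
--             continue
--         if left_val == 0:
--             row[left_index] = right_val
--             row[right_index] = 0
--         elif left_val == right_val:
--             row[left_index] = 2 * left_val
--             row[right_index] = 0
--             score += left_val
--             left_index += 1
--         elif left_val != right_val:
--             row[right_index] = 0
--             row[left_index + 1] = right_val
--             left_index += 1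
--         right_index += 1
--     return score
-- ===== SOURCE B (Python) =====
-- def collapse_row(row):
--     vals = [v for v in row if v != 0]
--     n = len(vals)
--     merged = []
--     score = 0
--     i = 0
--     while i < n:
--         if i + 1 < n and vals[i] == vals[i + 1]:
--             merged.append(2 * vals[i])
--             score += vals[i]
--             i += 2
--         else:
--             merged.append(vals[i])
--             i += 1
--     row[:] = merged + [0] * (len(row) - len(merged))
--     return score
-- ===== Notes on version B (the rewrite author's own statement) =====
-- stated objective: simpler
-- what changed: A's single in-place two-pointer scan with index bookkeeping is replaced by a filter-then-merge decomposition: compact the nonzero values, then one pass greedily merging adjacent equal pairs, finally padding with zeros and writing back in place.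
import Mathlib
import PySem

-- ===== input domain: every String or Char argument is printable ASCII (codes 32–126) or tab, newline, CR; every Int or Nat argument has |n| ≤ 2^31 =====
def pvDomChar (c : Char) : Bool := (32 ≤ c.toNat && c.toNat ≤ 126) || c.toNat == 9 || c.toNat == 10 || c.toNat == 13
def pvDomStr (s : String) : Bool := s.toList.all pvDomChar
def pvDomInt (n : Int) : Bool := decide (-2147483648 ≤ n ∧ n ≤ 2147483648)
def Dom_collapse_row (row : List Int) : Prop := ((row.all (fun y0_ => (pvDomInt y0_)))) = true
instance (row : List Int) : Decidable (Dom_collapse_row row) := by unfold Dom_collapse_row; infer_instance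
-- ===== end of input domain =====

-- B replaces A's in-place two-pointer scan by a filter-then-merge pass over the nonzero values
-- (objective: simpler). Both A and B mutate `row` in place the same way; the equivalence proved
-- here is about the RETURN value (the score) only.

-- ===== PORT A =====
-- A's while loop: right_index increases by 1 every iteration (also on the `continue` branch),
-- so fuel `row.length` is enough (the loop runs at most len-1 times).  All list accesses use
-- indices that are provably in range (0 ≤ li < ri < len, li+1 ≤ ri), so the total forms
-- pyGetD/pySetD coincide exactly with Python's row[i] reads/writes here.
def collapseLoopA (fuel : Nat) (row : List Int) (li ri : Nat) (score : Int) : Int :=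
  match fuel with
  | 0 => score
  | fuel + 1 =>
    if ri < row.length then
      let lv := PySem.List.pyGetD row (li : Int) 0
      let rv := PySem.List.pyGetD row (ri : Int) 0
      if rv = 0 then
        collapseLoopA fuel row li (ri + 1) score
      else if lv = 0 then
        collapseLoopA fuel
          (PySem.List.pySetD (PySem.List.pySetD row (li : Int) rv) (ri : Int) 0)
          li (ri + 1) score
      else if lv = rv then
        collapseLoopA fuel
          (PySem.List.pySetD (PySem.List.pySetD row (li : Int) (2 * lv)) (ri : Int) 0)
          (li + 1) (ri + 1) (score + lv)
      else
        collapseLoopA fuel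
          (PySem.List.pySetD (PySem.List.pySetD row (ri : Int) 0) ((li : Int) + 1) rv)
          (li + 1) (ri + 1) score
    else score

def collapse_row (row : List Int) : Int :=
  collapseLoopA row.length row 0 1 0

-- ===== PORT B =====
-- Source B's index-based while loop over the compacted list `vals`, carrying `merged` and `score`.
-- The reads vals[i], vals[i+1] are guarded by i < n resp. i+1 < n, so the total form pyGetD
-- coincides exactly with Python's reads here.
def mergeLoopB (vals : List Int) (i : Nat) (merged : List Int) (score : Int) : List Int × Int :=
  if i < vals.length then
    if i + 1 < vals.length ∧
        PySem.List.pyGetD vals (i : Int) 0 = PySem.List.pyGetD vals ((i + 1 : Nat) : Int) 0 then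
      mergeLoopB vals (i + 2) (merged ++ [2 * PySem.List.pyGetD vals (i : Int) 0])
        (score + PySem.List.pyGetD vals (i : Int) 0)
    else
      mergeLoopB vals (i + 1) (merged ++ [PySem.List.pyGetD vals (i : Int) 0]) score
  else (merged, score)
termination_by vals.length - i

def collapse_row_alt (row : List Int) : Int :=
  let vals := row.filter (fun v => decide (v ≠ 0))
  let res := mergeLoopB vals 0 [] 0
  -- row[:] = res.1 ++ zero padding (in-place mutation, not part of the returned value)
  res.2

-- ===== PRECONDITION & SPEC =====
def Spec_collapse_row (row : List Int) (out : Int) : Prop := out = collapse_row_alt row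
instance (row : List Int) (out : Int) : Decidable (Spec_collapse_row row out) := by unfold Spec_collapse_row; infer_instance

-- ===== CLAIM (what is proved, stated in full; the proofs are below) =====
def Claim_equal_collapse_row : Prop := ∀ (row : List Int), Dom_collapse_row row → Spec_collapse_row row (collapse_row row)

-- ===== LEMMAS AND PROOFS =====

-- Specification of B's merge score: greedy pairing of adjacent equal values.
def mSpec : List Int → Int
  | [] => 0
  | [_] => 0
  | v :: w :: ws => if v = w then v + mSpec ws else mSpec (w :: ws)

-- Abstraction of A's loop state: `o` is the current open slot value row[li]
-- (0 means the slot is empty), the list is the remaining nonzero input values.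
def gSpec : Int → List Int → Int
  | _, [] => 0
  | o, v :: vs => if o = 0 then gSpec v vs else if o = v then o + gSpec 0 vs else gSpec v vs

theorem getD_set_self (xs : List Int) (i : Nat) (v : Int) (h : i < xs.length) :
    (xs.set i v).getD i 0 = v := by
  simp [List.getD, h]

theorem getD_set_ne (xs : List Int) (i j : Nat) (v : Int) (h : i ≠ j) :
    (xs.set i v).getD j 0 = xs.getD j 0 := by
  simp [List.getD, h]

theorem mergeLoopB_snd (vals : List Int) (k : Nat) : ∀ (i : Nat) (merged : List Int) (score : Int),
    vals.length - i ≤ k →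
    (mergeLoopB vals i merged score).2 = score + mSpec (vals.drop i) := by
  induction k with
  | zero =>
    intro i merged score hk
    rw [mergeLoopB, if_neg (by omega), List.drop_of_length_le (by omega)]
    simp [mSpec]
  | succ k ih =>
    intro i merged score hk
    rw [mergeLoopB]
    by_cases hi : i < vals.length
    · rw [if_pos hi, List.drop_eq_getElem_cons hi]
      by_cases hc : i + 1 < vals.length ∧
          PySem.List.pyGetD vals (i : Int) 0 = PySem.List.pyGetD vals ((i + 1 : Nat) : Int) 0
      · rw [if_pos hc, ih (i + 2) _ _ (by omega)]
        rw [List.drop_eq_getElem_cons hc.1]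
        have heq : vals[i] = vals[i + 1] := by
          have := hc.2
          rwa [PySem.List.pyGetD_natCast, PySem.List.pyGetD_natCast,
            List.getD_eq_getElem _ _ hi, List.getD_eq_getElem _ _ hc.1] at this
        simp only [mSpec, if_pos heq, PySem.List.pyGetD_natCast,
          List.getD_eq_getElem _ _ hi]
        rw [show i + 1 + 1 = i + 2 by omega]
        omega
      · rw [if_neg hc, ih (i + 1) _ _ (by omega)]
        by_cases hi1 : i + 1 < vals.length
        · rw [List.drop_eq_getElem_cons hi1]
          have hne : vals[i] ≠ vals[i + 1] := by
            intro h
            exact hc ⟨hi1, by rw [PySem.List.pyGetD_natCast, PySem.List.pyGetD_natCast,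
              List.getD_eq_getElem _ _ hi, List.getD_eq_getElem _ _ hi1, h]⟩
          simp only [mSpec, if_neg hne]
        · rw [List.drop_of_length_le (by omega)]
          simp [mSpec]
    · rw [if_neg hi, List.drop_of_length_le (by omega)]
      simp [mSpec]

theorem gSpec_eq_mSpec (vs : List Int) (h : ∀ v ∈ vs, v ≠ 0) :
    gSpec 0 vs = mSpec vs ∧ ∀ o, o ≠ 0 → gSpec o vs = mSpec (o :: vs) := by
  induction vs with
  | nil => simp [gSpec, mSpec]
  | cons v vs ih =>
    have hv : v ≠ 0 := h v (by simp)
    have ih' := ih (fun x hx => h x (by simp [hx]))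
    constructor
    · simp [gSpec, ih'.2 v hv]
    · intro o ho
      by_cases hov : o = v
      · simp [gSpec, mSpec, hov, hv, ih'.1]
      · simp [gSpec, mSpec, ho, hov, ih'.2 v hv]

theorem collapseLoopA_eq (fuel : Nat) : ∀ (row : List Int) (li ri : Nat) (score : Int),
    li < ri → row.length ≤ fuel + ri →
    (∀ j, li < j → j < ri → row.getD j 0 = 0) →
    collapseLoopA fuel row li ri score
      = score + gSpec (row.getD li 0) ((row.drop ri).filter (fun v => decide (v ≠ 0))) := by
  induction fuel with
  | zero =>
    intro row li ri score _ hfin _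
    rw [List.drop_of_length_le (by omega)]
    simp [collapseLoopA, gSpec]
  | succ fuel ih =>
    intro row li ri score hlt hfin hz
    rw [collapseLoopA]
    by_cases hri : ri < row.length
    · have hli : li < row.length := lt_trans hlt hri
      simp only [if_pos hri, PySem.List.pyGetD_natCast, PySem.List.pySetD_natCast,
        List.getD_eq_getElem _ _ hli, List.getD_eq_getElem _ _ hri]
      rw [List.drop_eq_getElem_cons hri, List.filter_cons]
      by_cases hrv : row[ri] = 0
      · -- right value is zero: skip
        rw [if_pos hrv,
          if_neg (show ¬((decide (row[ri] ≠ 0)) = true) from by simp [hrv])]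
        rw [ih row li (ri + 1) score (by omega) (by omega)
          (by intro j h1 h2
              rcases Nat.lt_succ_iff_lt_or_eq.mp h2 with h | h
              · exact hz j h1 h
              · subst h; rw [List.getD_eq_getElem _ _ hri]; exact hrv)]
        rw [List.getD_eq_getElem _ _ hli]
      · rw [if_neg hrv,
          if_pos (show (decide (row[ri] ≠ 0)) = true from by simp [hrv])]
        by_cases hlv : row[li] = 0
        · -- left slot empty: move right value into it
          rw [if_pos hlv]
          set row2 := (row.set li row[ri]).set ri 0 with hrow2
          have hlen2 : row2.length = row.length := by simp [hrow2]
          rw [ih row2 li (ri + 1) score (by omega) (by omega)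
            (by intro j h1 h2
                rcases Nat.lt_succ_iff_lt_or_eq.mp h2 with h | h
                · rw [hrow2, getD_set_ne _ _ _ _ (by omega),
                    getD_set_ne _ _ _ _ (by omega)]
                  exact hz j h1 h
                · subst h; exact getD_set_self _ _ _ (by simp; omega))]
          have hdrop : row2.drop (ri + 1) = row.drop (ri + 1) := by
            rw [hrow2, List.drop_set_of_lt (by omega), List.drop_set_of_lt (by omega)]
          have hget2 : row2.getD li 0 = row[ri] := by
            rw [hrow2, getD_set_ne _ _ _ _ (by omega), getD_set_self _ _ _ hli]
          rw [hdrop, hget2, hlv]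
          simp [gSpec]
        · rw [if_neg hlv]
          by_cases heq : row[li] = row[ri]
          · -- merge: double the left slot, score the merge
            rw [if_pos heq]
            set row2 := (row.set li (2 * row[li])).set ri 0 with hrow2
            have hlen2 : row2.length = row.length := by simp [hrow2]
            rw [ih row2 (li + 1) (ri + 1) (score + row[li]) (by omega) (by omega)
              (by intro j h1 h2
                  rcases Nat.lt_succ_iff_lt_or_eq.mp h2 with h | h
                  · rw [hrow2, getD_set_ne _ _ _ _ (by omega),
                      getD_set_ne _ _ _ _ (by omega)]
                    exact hz j (by omega) h
                  · subst h; exact getD_set_self _ _ _ (by simp; omega))]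
            have hdrop : row2.drop (ri + 1) = row.drop (ri + 1) := by
              rw [hrow2, List.drop_set_of_lt (by omega), List.drop_set_of_lt (by omega)]
            have hget2 : row2.getD (li + 1) 0 = 0 := by
              by_cases hc : li + 1 = ri
              · rw [hrow2, hc]; exact getD_set_self _ _ _ (by simp; omega)
              · rw [hrow2, getD_set_ne _ _ _ _ (by omega),
                  getD_set_ne _ _ _ _ (by omega)]
                exact hz (li + 1) (by omega) (by omega)
            rw [hdrop, hget2]
            simp only [gSpec, if_neg hlv, if_pos heq]
            ring
          · -- different values: slide the right value next to the left slot
            rw [if_neg heq]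
            have hcast : (li : Int) + 1 = ((li + 1 : Nat) : Int) := by push_cast; ring
            rw [hcast, PySem.List.pySetD_natCast]
            set row2 := (row.set ri 0).set (li + 1) row[ri] with hrow2
            have hlen2 : row2.length = row.length := by simp [hrow2]
            rw [ih row2 (li + 1) (ri + 1) score (by omega) (by omega)
              (by intro j h1 h2
                  rcases Nat.lt_succ_iff_lt_or_eq.mp h2 with h | h
                  · rw [hrow2, getD_set_ne _ _ _ _ (by omega),
                      getD_set_ne _ _ _ _ (by omega)]
                    exact hz j (by omega) h
                  · subst h
                    rw [hrow2, getD_set_ne _ _ _ _ (by omega),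
                      getD_set_self _ _ _ (by simpa using hri)])]
            have hdrop : row2.drop (ri + 1) = row.drop (ri + 1) := by
              rw [hrow2, List.drop_set_of_lt (by omega), List.drop_set_of_lt (by omega)]
            have hget2 : row2.getD (li + 1) 0 = row[ri] := by
              rw [hrow2, getD_set_self _ _ _ (by simp; omega)]
            rw [hdrop, hget2]
            simp only [gSpec, if_neg hlv, if_neg heq]
    · rw [if_neg hri, List.drop_of_length_le (by omega)]
      simp [gSpec]

-- ===== VERDICT (by name: the statement is the Claim_ definition above) =====
theorem collapse_row_spec : Claim_equal_collapse_row := by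
  intro row _
  unfold Spec_collapse_row collapse_row collapse_row_alt
  rw [collapseLoopA_eq row.length row 0 1 0 (by omega) (by omega) (by omega)]
  rw [mergeLoopB_snd _ (row.filter (fun v => decide (v ≠ 0))).length 0 [] 0 (by omega)]
  have hmem : ∀ v ∈ row.filter (fun v => decide (v ≠ 0)), v ≠ 0 := by
    intro v hv; simpa using (List.mem_filter.mp hv).2
  match row with
  | [] => simp [gSpec, mSpec]
  | x :: rest =>
    have hm := gSpec_eq_mSpec (rest.filter (fun v => decide (v ≠ 0)))
      (by intro v hv; simpa using (List.mem_filter.mp hv).2)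
    by_cases hx : x = 0
    · simp [hx, List.getD]; simpa using hm.1
    · simp [hx]; simpa using hm.2 x hx
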